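-- pv_equiv track=rewrite | github.com/dries007/AdventOfCode | 2018/day2.py | day2_1
-- ===== SOURCE A (Python) =====
-- def count_letters(x):
--     return {
--         l: x.count(l) for l in set(x)
--     }
--
-- def day2_1(inp):
--     inp = [x.strip() for x in inp.strip().splitlines() if x.strip()]
--     two = []
--     three = []
--     for x in inp:
--         count = count_letters(x)
--         if 2 in count.values():
--             two.append(x)
--         if 3 in count.values():
--             three.append(x)
--     return len(two) * len(three)
-- ===== SOURCE B (Python) =====
-- def run_lengths(chars):
--     # lengths of maximal runs of equal adjacent elements
--     if not chars:
--         return []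
--     c = chars[0]
--     i = 1
--     while i < len(chars) and chars[i] == c:
--         i += 1
--     return [i] + run_lengths(chars[i:])
--
-- def day2_1(inp):
--     twos = 0
--     threes = 0
--     for raw in inp.strip().splitlines():
--         line = raw.strip()
--         if not line:
--             continue
--         lens = run_lengths(sorted(line))
--         if 2 in lens:
--             twos += 1
--         if 3 in lens:
--             threes += 1
--     return twos * threes
-- ===== Notes on version B (the rewrite author's own statement) =====
-- stated objective: alternative
-- what changed: Per line, instead of building a letter->count dict via repeated str.count over set(x) and collecting matching lines into two lists, B sorts the characters and scans the contiguous run lengths once, keeping two integer tallies; the product of the tallies is returned.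
import Mathlib
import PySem

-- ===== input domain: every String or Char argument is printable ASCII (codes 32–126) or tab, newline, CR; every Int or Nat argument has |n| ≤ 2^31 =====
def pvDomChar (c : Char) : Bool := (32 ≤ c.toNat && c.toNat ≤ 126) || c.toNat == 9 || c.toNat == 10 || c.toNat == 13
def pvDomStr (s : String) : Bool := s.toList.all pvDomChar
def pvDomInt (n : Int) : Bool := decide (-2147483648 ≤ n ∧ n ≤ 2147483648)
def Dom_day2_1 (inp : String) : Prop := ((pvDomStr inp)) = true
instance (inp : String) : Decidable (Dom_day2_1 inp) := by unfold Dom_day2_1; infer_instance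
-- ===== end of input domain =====

-- B replaces A's per-line letter->count dict (one str.count pass per distinct letter, lines
-- collected into two lists) by sorting the line and scanning contiguous run lengths once,
-- keeping two integer tallies (objective: alternative algorithm).

-- ===== PORT A =====
-- {l: x.count(l) for l in set(x)}; for a single character l, x.count(l) is the number of
-- occurrences of that character, so it is ported as List.count.  The dict is consumed only
-- through membership in .values, which does not depend on set iteration order.
def count_letters (x : List Char) : PySem.Dict Char Int :=
  PySem.Dict.ofList ((PySem.Set.ofList x).map (fun l => (l, (x.count l : Int))))

-- the body of A's for loop (two list accumulators)
def aStep (acc : List (List Char) × List (List Char)) (x : List Char) :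
    List (List Char) × List (List Char) :=
  let count := count_letters x
  let acc1 := if count.values.contains (2 : Int) then acc.1 ++ [x] else acc.1
  let acc2 := if count.values.contains (3 : Int) then acc.2 ++ [x] else acc.2
  (acc1, acc2)

def day2_1 (inp : String) : Int :=
  let lines := ((PySem.Str.splitlines (PySem.Str.strip inp)).map
      (fun s => PySem.Chars.strip s.toList)).filter (fun x => !x.isEmpty)
  let res := lines.foldl aStep ([], [])
  (res.1.length : Int) * (res.2.length : Int)

-- ===== PORT B =====
-- run_lengths: the while loop finds i = 1 + length of the leading block of chars[1:] equal
-- to chars[0]; the recursive call receives chars[i:].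
def runLengths (cs : List Char) : List Nat :=
  match cs with
  | [] => []
  | c :: rest =>
      ((rest.takeWhile (· == c)).length + 1) :: runLengths (rest.dropWhile (· == c))
termination_by cs.length
decreasing_by
  simp only [List.length_cons]
  exact Nat.lt_succ_of_le (List.length_dropWhile_le _ _)

-- the body of B's for loop (two Int tallies; empty stripped lines are skipped)
def bStep (acc : Int × Int) (raw : String) : Int × Int :=
  let line := PySem.Chars.strip raw.toList
  if line.isEmpty then acc
  else
    let lens := runLengths (PySem.List.sorted line (fun c => c) false)
    (acc.1 + (if lens.contains 2 then 1 else 0),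
     acc.2 + (if lens.contains 3 then 1 else 0))

def day2_1_alt (inp : String) : Int :=
  let res := (PySem.Str.splitlines (PySem.Str.strip inp)).foldl bStep (0, 0)
  res.1 * res.2

-- ===== PRECONDITION & SPEC =====
def Spec_day2_1 (inp : String) (out : Int) : Prop := out = day2_1_alt inp
instance (inp : String) (out : Int) : Decidable (Spec_day2_1 inp out) := by unfold Spec_day2_1; infer_instance

-- ===== CLAIM (what is proved, stated in full; the proofs are below) =====
def Claim_equal_day2_1 : Prop := ∀ (inp : String), Dom_day2_1 inp → Spec_day2_1 inp (day2_1 inp)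

-- ===== LEMMAS AND PROOFS =====

-- inserting a key not present in d appends the pair
theorem insert_fresh {κ ν : Type} [BEq κ] [LawfulBEq κ] (d : PySem.Dict κ ν) (k : κ) (v : ν)
    (h : ∀ p ∈ d.items, p.1 ≠ k) :
    (d.insert k v).items = d.items ++ [(k, v)] := by
  have hc : d.contains k = false := by
    simp only [PySem.Dict.contains, List.any_eq_false]
    intro p hp
    simpa using h p hp
  simp [PySem.Dict.insert, hc]

-- updating an empty-key-overlap dict with pairs having nodup keys appends all pairs
theorem update_fresh {κ ν : Type} [BEq κ] [LawfulBEq κ] (ps : List (κ × ν)) (d : PySem.Dict κ ν)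
    (hnd : (ps.map Prod.fst).Nodup) (hd : ∀ p ∈ d.items, ∀ q ∈ ps, p.1 ≠ q.1) :
    (d.update ps).items = d.items ++ ps := by
  induction ps generalizing d with
  | nil => simp [PySem.Dict.update]
  | cons q t ih =>
    simp only [List.map_cons, List.nodup_cons] at hnd
    have h1 : (d.insert q.1 q.2).items = d.items ++ [q] := by
      apply insert_fresh
      intro p hp
      exact hd p hp q (by simp)
    have : (d.update (q :: t)) = ((d.insert q.1 q.2).update t) := by
      simp [PySem.Dict.update]
    rw [this, ih _ hnd.2, h1]
    · simp
    · intro p hp r hr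
      rw [h1] at hp
      rcases List.mem_append.mp hp with h | h
      · exact hd p h r (by simp [hr])
      · simp only [List.mem_singleton] at h
        subst h
        intro he
        exact hnd.1 (he ▸ List.mem_map_of_mem hr)

theorem count_letters_values (x : List Char) :
    (count_letters x).values = (PySem.Set.ofList x).map (fun l => (x.count l : Int)) := by
  have h : (count_letters x).items = (PySem.Set.ofList x).map (fun l => (l, (x.count l : Int))) := by
    unfold count_letters PySem.Dict.ofList
    rw [update_fresh]
    · simp [PySem.Dict.empty]
    · have : ((PySem.Set.ofList x).map (fun l => (l, (x.count l : Int)))).map Prod.fst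
          = PySem.Set.ofList x := by simp [Function.comp_def]
      rw [this]; exact PySem.Set.nodup_ofList x
    · intro p hp; simp [PySem.Dict.empty] at hp
  simp [PySem.Dict.values, h, Function.comp_def]

-- run lengths of a sorted list are exactly the multiplicities of its elements
theorem runLengths_sorted (cs : List Char) (h : cs.Pairwise (· ≤ ·)) (n : Nat) :
    n ∈ runLengths cs ↔ ∃ c ∈ cs, cs.count c = n := by
  induction cs using runLengths.induct with
  | case1 => simp [runLengths]
  | case2 c rest ih =>
    have hpw := h
    rw [List.pairwise_cons] at hpw
    set t := rest.takeWhile (· == c) with ht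
    set d := rest.dropWhile (· == c) with hd
    have hrest : t ++ d = rest := List.takeWhile_append_dropWhile
    have htc : ∀ e ∈ t, e = c := by
      intro e he
      have := List.mem_takeWhile_imp he
      simpa using this
    have hdc : ∀ e ∈ d, c < e := by
      intro e he
      have hsub : d.Sublist rest := hd ▸ List.dropWhile_sublist _
      have hdpw : d.Pairwise (· ≤ ·) := hpw.2.sublist hsub
      cases hdl : d with
      | nil => rw [hdl] at he; simp at he
      | cons a b =>
        have hhead := List.head?_dropWhile_not (· == c) rest
        rw [← hd, hdl] at hhead
        simp only [List.head?_cons] at hhead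
        have hac : a ≠ c := by simpa using hhead
        have hmem_a : a ∈ rest := hsub.mem (hdl ▸ List.mem_cons_self)
        have hlt : c < a := lt_of_le_of_ne (hpw.1 a hmem_a) (Ne.symm hac)
        rw [hdl] at he hdpw
        rcases List.mem_cons.mp he with rfl | he'
        · exact hlt
        · exact lt_of_lt_of_le hlt (List.rel_of_pairwise_cons hdpw he')
    have hcd : d.count c = 0 := by
      rw [List.count_eq_zero]
      intro hcmem
      exact absurd rfl (ne_of_gt (hdc c hcmem))
    have hct : t.count c = t.length := by
      rw [List.count_eq_length]
      intro e he
      exact ((htc e he) ▸ rfl)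
    have hcount_c : (c :: rest).count c = t.length + 1 := by
      rw [← hrest]
      simp [List.count_append, hct, hcd]
    have hd_pw : d.Pairwise (· ≤ ·) := hpw.2.sublist (List.dropWhile_sublist _)
    have hcount_d : ∀ e ∈ d, (c :: rest).count e = d.count e := by
      intro e he
      have hec : e ≠ c := ne_of_gt (hdc e he)
      have htce : t.count e = 0 := by
        rw [List.count_eq_zero]
        intro hmem
        exact hec (htc e hmem)
      rw [← hrest]
      simp [List.count_append, htce, Ne.symm hec]
    rw [runLengths]
    rw [← ht, ← hd]
    simp only [List.mem_cons]
    constructor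
    · rintro (rfl | hmem)
      · exact ⟨c, by simp, hcount_c⟩
      · rcases (ih hd_pw).mp hmem with ⟨e, he, hce⟩
        refine ⟨e, ?_, ?_⟩
        · right
          rw [← hrest]
          exact List.mem_append_right _ he
        · rw [hcount_d e he, hce]
    · rintro ⟨e, he, hce⟩
      rcases he with rfl | he'
      · left; omega
      · rw [← hrest] at he'
        rcases List.mem_append.mp he' with hT | hD
        · -- e ∈ t so e = c, same count
          have := htc e hT
          subst this
          left; omega
        · right
          exact (ih hd_pw).mpr ⟨e, hD, by rw [← hcount_d e hD, hce]⟩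

-- the two per-line tests agree
theorem test_eq (x : List Char) (n : Nat) :
    ((count_letters x).values.contains (n : Int))
      = ((runLengths (PySem.List.sorted x (fun c => c) false)).contains n) := by
  rw [Bool.eq_iff_iff]
  rw [count_letters_values]
  have hperm : (PySem.List.sorted x (fun c => c) false).Perm x :=
    PySem.List.sorted_perm x (fun c => c) false
  have hpw : (PySem.List.sorted x (fun c => c) false).Pairwise (· ≤ ·) :=
    PySem.List.sorted_pairwise x (fun c => c)
  simp only [List.contains_iff_mem, List.mem_map, PySem.Set.mem_ofList]
  rw [runLengths_sorted _ hpw]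
  constructor
  · rintro ⟨l, hl, he⟩
    exact ⟨l, hperm.mem_iff.mpr hl, by rw [hperm.count_eq]; omega⟩
  · rintro ⟨c, hc, hn⟩
    exact ⟨c, hperm.mem_iff.mp hc, by rw [hperm.count_eq] at hn; omega⟩

theorem test_eq2 (x : List Char) :
    ((count_letters x).values.contains (2 : Int))
      = ((runLengths (PySem.List.sorted x (fun c => c) false)).contains 2) := by
  have h := test_eq x 2
  norm_num at h
  rw [Bool.eq_iff_iff]
  simp only [List.contains_iff_mem]
  exact h

theorem test_eq3 (x : List Char) :
    ((count_letters x).values.contains (3 : Int))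
      = ((runLengths (PySem.List.sorted x (fun c => c) false)).contains 3) := by
  have h := test_eq x 3
  norm_num at h
  rw [Bool.eq_iff_iff]
  simp only [List.contains_iff_mem]
  exact h

-- the two loops agree, generalizing the accumulators
theorem loop_eq (ls : List String) (a2 a3 : List (List Char)) :
    ls.foldl bStep ((a2.length : Int), (a3.length : Int))
    = (((((ls.map (fun s => PySem.Chars.strip s.toList)).filter (fun x => !x.isEmpty)).foldl
          aStep (a2, a3)).1.length : Int),
       ((((ls.map (fun s => PySem.Chars.strip s.toList)).filter (fun x => !x.isEmpty)).foldl
          aStep (a2, a3)).2.length : Int)) := by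
  induction ls generalizing a2 a3 with
  | nil => simp
  | cons s t ih =>
    simp only [List.map_cons, List.foldl_cons, List.filter_cons]
    by_cases hE : (PySem.Chars.strip s.toList).isEmpty
    · rw [if_neg (by simp [hE])]
      have hstep : bStep ((a2.length : Int), (a3.length : Int)) s
          = ((a2.length : Int), (a3.length : Int)) := by
        simp [bStep, hE]
      rw [hstep]
      exact ih a2 a3
    · rw [if_pos (by simp [hE])]
      set line := PySem.Chars.strip s.toList with hline
      set a2' := if (runLengths (PySem.List.sorted line (fun c => c) false)).contains 2
        then a2 ++ [line] else a2 with ha2'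
      set a3' := if (runLengths (PySem.List.sorted line (fun c => c) false)).contains 3
        then a3 ++ [line] else a3 with ha3'
      have hstepB : bStep ((a2.length : Int), (a3.length : Int)) s
          = ((a2'.length : Int), (a3'.length : Int)) := by
        simp only [bStep, ← hline, hE, Bool.false_eq_true, if_false]
        rw [Prod.mk.injEq]
        refine ⟨?_, ?_⟩
        · rw [ha2']; split <;> simp
        · rw [ha3']; split <;> simp
      have hstepA : aStep (a2, a3) line = (a2', a3') := by
        simp only [aStep]
        rw [test_eq2 line, test_eq3 line, ← ha2', ← ha3']
      rw [hstepB, List.foldl_cons, hstepA]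
      exact ih a2' a3'

-- ===== VERDICT (by name: the statement is the Claim_ definition above) =====
theorem day2_1_spec : Claim_equal_day2_1 := by
  intro inp _
  unfold Spec_day2_1 day2_1 day2_1_alt
  have h := loop_eq (PySem.Str.splitlines (PySem.Str.strip inp)) [] []
  simp only [List.length_nil, Nat.cast_zero] at h
  simp only [h]
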